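-- pv_equiv track=rewrite | github.com/Natsuhadder/ocr_receipts | StringUtils.py | CorrectDigits
-- ===== SOURCE A (Python) =====
-- def CorrectDigits(text = '') :
--
--     """
--     Corrects mispelled digits in a given text based on a dictionary of personal knowledge.
--     """
--     DigitCorrection = {'@': '0', 'S': '5', 'U': '4', 'T': '7', 'I': '1', 'L': '1', 'O': '0', 'Q': '0', 'B': '8', 'o': '0', 's': '5', ',' : '.', 'i' : '.' , 'e' : '4'}
--     corrected_text = ""
--
--     for i in range(len(text)):
--         if text[i] in DigitCorrection and len(text)>1:
--             if (i > 0 and (text[i-1].isdigit() or text[i-1]=='.' )) or (len(text)>1 and i == 0 and text[i+1].isdigit()):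
--                 corrected_text += DigitCorrection[text[i]]
--             elif (i < len(text)-1 and (text[i+1].isdigit() or text[i+1]=='.')):
--                 corrected_text += DigitCorrection[text[i]]
--             else:
--                 corrected_text += text[i]
--         else:
--             corrected_text += text[i]
--
--     return corrected_text
-- ===== SOURCE B (Python) =====
-- def CorrectDigits(text=''):
--     """
--     Corrects mispelled digits in a given text based on a dictionary of personal knowledge.
--     """
--     DigitCorrection = {'@': '0', 'S': '5', 'U': '4', 'T': '7', 'I': '1', 'L': '1', 'O': '0', 'Q': '0', 'B': '8', 'o': '0', 's': '5', ',': '.', 'i': '.', 'e': '4'}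
--
--     # Pass 1: every digit/dot marks its two neighbour positions as correctable.
--     hot = set()
--     for i, ch in enumerate(text):
--         if ch.isdigit() or ch == '.':
--             hot.add(i - 1)
--             hot.add(i + 1)
--
--     # Pass 2: substitute exactly the marked positions that hold a known misspelling.
--     return ''.join(DigitCorrection[ch] if ch in DigitCorrection and i in hot else ch
--                    for i, ch in enumerate(text))
-- ===== Notes on version B (the rewrite author's own statement) =====
-- stated objective: alternative
-- what changed: Instead of A's indexed loop that tests each character's neighbours through a cascaded three-way branch, B runs two staged passes: the first iterates over the anchors (digits/dots) and records the index set of their neighbour positions, the second substitutes a character iff its index is in that precomputed set, so the per-character neighbour inspection disappears.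
import Mathlib
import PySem

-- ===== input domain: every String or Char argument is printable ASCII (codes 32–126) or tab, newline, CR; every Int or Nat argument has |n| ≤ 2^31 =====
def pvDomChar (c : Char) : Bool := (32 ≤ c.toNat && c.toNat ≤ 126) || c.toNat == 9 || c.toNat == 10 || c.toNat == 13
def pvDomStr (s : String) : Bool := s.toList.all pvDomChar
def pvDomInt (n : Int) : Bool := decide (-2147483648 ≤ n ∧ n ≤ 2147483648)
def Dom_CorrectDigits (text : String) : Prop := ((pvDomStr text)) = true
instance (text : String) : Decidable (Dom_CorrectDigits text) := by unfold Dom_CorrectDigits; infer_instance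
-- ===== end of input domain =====

-- B replaces A's per-character neighbour inspection (an index loop with a cascaded
-- three-way branch) by two staged passes: first collect the index set of the positions
-- adjacent to a digit/dot, then substitute exactly the marked dictionary keys
-- (objective: alternative; same value on every input).

-- the correction table, identical literal in both Pythons
def pvDC : PySem.Dict Char Char :=
  PySem.Dict.ofList [('@','0'),('S','5'),('U','4'),('T','7'),('I','1'),('L','1'),('O','0'),('Q','0'),('B','8'),('o','0'),('s','5'),(',','.'),('i','.'),('e','4')]

-- ===== PORT A =====
-- every index accessed below lies in range (i comes from range(len(text)) and each
-- neighbour access is guarded by the surrounding condition), so Python's text[·] is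
-- total here and pyGetD is exact.
def CorrectDigits (text : String) : String :=
  let cs := text.toList
  String.ofList ((PySem.List.pyRange 0 (cs.length : Int) 1).foldl (fun acc i =>
    if pvDC.contains (PySem.List.pyGetD cs i ' ') = true ∧ 1 < (cs.length : Int) then
      if (0 < i ∧ (PySem.Chars.isdigit (PySem.List.pyGetD cs (i-1) ' ') = true ∨ PySem.List.pyGetD cs (i-1) ' ' = '.'))
          ∨ (1 < (cs.length : Int) ∧ i = 0 ∧ PySem.Chars.isdigit (PySem.List.pyGetD cs (i+1) ' ') = true) then
        acc ++ [pvDC.getD (PySem.List.pyGetD cs i ' ') (PySem.List.pyGetD cs i ' ')]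
      else if i < (cs.length : Int) - 1 ∧ (PySem.Chars.isdigit (PySem.List.pyGetD cs (i+1) ' ') = true ∨ PySem.List.pyGetD cs (i+1) ' ' = '.') then
        acc ++ [pvDC.getD (PySem.List.pyGetD cs i ' ') (PySem.List.pyGetD cs i ' ')]
      else acc ++ [PySem.List.pyGetD cs i ' ']
    else acc ++ [PySem.List.pyGetD cs i ' ']) [])

-- ===== PORT B =====
-- pass 1: the set of indices adjacent to a digit or dot (hot = set(); hot.add(i-1); hot.add(i+1))
def pvHot (cs : List Char) : PySem.Set Int :=
  (PySem.List.enumerate cs 0).foldl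
    (fun s p => if (PySem.Chars.isdigit p.2 || p.2 == '.') = true then
        PySem.Set.add (PySem.Set.add s (p.1 - 1)) (p.1 + 1) else s)
    PySem.Set.empty

-- pass 2: ''.join(DigitCorrection[ch] if ch in DigitCorrection and i in hot else ch for i, ch in enumerate(text))
def CorrectDigits_alt (text : String) : String :=
  let cs := text.toList
  let hot := pvHot cs
  String.ofList ((PySem.List.enumerate cs 0).map
    (fun p => if (pvDC.contains p.2 && PySem.Set.contains hot p.1) = true then pvDC.getD p.2 p.2 else p.2))

-- ===== PRECONDITION & SPEC =====
def Spec_CorrectDigits (text : String) (out : String) : Prop := out = CorrectDigits_alt text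
instance (text : String) (out : String) : Decidable (Spec_CorrectDigits text out) := by unfold Spec_CorrectDigits; infer_instance

-- ===== CLAIM (what is proved, stated in full; the proofs are below) =====
def Claim_equal_CorrectDigits : Prop := ∀ (text : String), Dom_CorrectDigits text → Spec_CorrectDigits text (CorrectDigits text)

-- ===== LEMMAS AND PROOFS =====

-- the character A's loop emits at index i (A's loop body minus the accumulator)
def pvF (cs : List Char) (i : Int) : Char :=
  if pvDC.contains (PySem.List.pyGetD cs i ' ') = true ∧ 1 < (cs.length : Int) then
    if (0 < i ∧ (PySem.Chars.isdigit (PySem.List.pyGetD cs (i-1) ' ') = true ∨ PySem.List.pyGetD cs (i-1) ' ' = '.'))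
        ∨ (1 < (cs.length : Int) ∧ i = 0 ∧ PySem.Chars.isdigit (PySem.List.pyGetD cs (i+1) ' ') = true) then
      pvDC.getD (PySem.List.pyGetD cs i ' ') (PySem.List.pyGetD cs i ' ')
    else if i < (cs.length : Int) - 1 ∧ (PySem.Chars.isdigit (PySem.List.pyGetD cs (i+1) ' ') = true ∨ PySem.List.pyGetD cs (i+1) ' ' = '.') then
      pvDC.getD (PySem.List.pyGetD cs i ' ') (PySem.List.pyGetD cs i ' ')
    else PySem.List.pyGetD cs i ' '
  else PySem.List.pyGetD cs i ' '

-- "digit or dot" — the anchor test of both programs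
def pvNear (ch : Char) : Bool := PySem.Chars.isdigit ch || ch == '.'

-- the neighbour characters of index k (out of range = ' ', which is never an anchor)
def pvPrev (cs : List Char) (k : Nat) : Char := if k = 0 then ' ' else cs.getD (k-1) ' '
def pvNext (cs : List Char) (k : Nat) : Char := if k + 1 < cs.length then cs.getD (k+1) ' ' else ' '

-- per-index agreement of A's branch cascade with the single digit-or-dot neighbour condition
theorem pvF_char (cs : List Char) (k : Nat) (hk : k < cs.length) :
    pvF cs (k : Int) =
      (if pvDC.contains (cs.getD k ' ') = true ∧ (pvNear (pvPrev cs k) || pvNear (pvNext cs k)) = true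
       then pvDC.getD (cs.getD k ' ') (cs.getD k ' ') else cs.getD k ' ') := by
  unfold pvF pvPrev pvNext pvNear
  by_cases hk0 : k = 0
  · subst hk0
    by_cases h1 : cs.length = 1
    · simp [h1, show PySem.Chars.isdigit ' ' = false from rfl,
        PySem.List.pyGetD_ofNat']
    · have h2 : 2 ≤ cs.length := by omega
      have hlt : (1:Int) < (cs.length : Int) := by exact_mod_cast h2
      have hlt2 : (0:Int) < (cs.length : Int) - 1 := by omega
      have hnx : 0 + 1 < cs.length := by omega
      simp only [Nat.cast_zero, zero_add, PySem.List.pyGetD_ofNat',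
        show PySem.Chars.isdigit ' ' = false from rfl,
        show (' ' == '.') = false from rfl, hlt, hlt2, hnx, if_pos, true_and,
        and_true, Bool.false_or, lt_self_iff_false, false_and, false_or]
      split_ifs <;> simp_all
  · have hkpos : 0 < k := by omega
    have ep : ((k:Int) - 1) = ((k-1 : Nat) : Int) := by omega
    have en : ((k:Int) + 1) = ((k+1 : Nat) : Int) := by push_cast; ring
    have h0k : (0:Int) < (k:Int) := by exact_mod_cast hkpos
    have hn2 : (1:Int) < (cs.length : Int) := by
      have : 2 ≤ cs.length := by omega
      exact_mod_cast this
    have hkne : ¬ ((k:Int) = 0) := by exact_mod_cast hk0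
    rw [ep, en]
    by_cases hlast : k + 1 = cs.length
    · have hge : ¬ ((k:Int) < (cs.length : Int) - 1) := by omega
      have hnnext : ¬ (k + 1 < cs.length) := by omega
      simp only [PySem.List.pyGetD_natCast, hk0, hkne, false_and, or_false,
        h0k, true_and, hn2, hge, hnnext,
        show PySem.Chars.isdigit ' ' = false from rfl,
        show (' ' == '.') = false from rfl, Bool.or_false]
      split_ifs <;> first | rfl | (exfalso; omega) | simp_all [show PySem.Chars.isdigit ' ' = false from rfl, show (' ' == '.') = false from rfl]
    · have hmid : (k:Int) < (cs.length : Int) - 1 := by omega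
      have hnext : k + 1 < cs.length := by omega
      simp only [PySem.List.pyGetD_natCast, hk0, hkne, false_and, or_false,
        h0k, true_and, hn2, hmid, hnext, if_pos]
      split_ifs <;> first | rfl | (exfalso; omega) | simp_all

-- membership in pass 1's fold: x was added iff some anchor pair of the list puts it there
theorem pv_mem_foldl_hot (l : List (Int × Char)) (s : PySem.Set Int) (x : Int) :
    x ∈ l.foldl (fun s p => if (PySem.Chars.isdigit p.2 || p.2 == '.') = true then
        PySem.Set.add (PySem.Set.add s (p.1 - 1)) (p.1 + 1) else s) s
      ↔ x ∈ s ∨ ∃ p ∈ l, pvNear p.2 = true ∧ (x = p.1 - 1 ∨ x = p.1 + 1) := by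
  induction l generalizing s with
  | nil => simp
  | cons q l ih =>
    simp only [List.foldl_cons]
    by_cases hq : pvNear q.2 = true
    · rw [if_pos (by simpa [pvNear] using hq), ih]
      simp only [PySem.Set.mem_add, List.exists_mem_cons_iff, hq, true_and]
      simp [or_assoc]
    · rw [if_neg (by simpa [pvNear] using hq), ih]
      simp [List.exists_mem_cons_iff, hq]

-- the precomputed set holds index k iff k's neighbour (in range) is a digit or dot
theorem pvHot_contains (cs : List Char) (k : Nat) (hk : k < cs.length) :
    PySem.Set.contains (pvHot cs) (k : Int) = (pvNear (pvPrev cs k) || pvNear (pvNext cs k)) := by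
  have hmem : (k : Int) ∈ pvHot cs ↔ (pvNear (pvPrev cs k) || pvNear (pvNext cs k)) = true := by
    unfold pvHot
    rw [pv_mem_foldl_hot]
    simp only [PySem.Set.empty, List.not_mem_nil, false_or]
    constructor
    · rintro ⟨p, hp, h1, h2⟩
      obtain ⟨j, hj, rfl⟩ := (PySem.List.mem_enumerate_iff cs 0 p).mp hp
      simp only [zero_add] at h1 h2 ⊢
      rcases h2 with h2 | h2
      · -- k = j - 1, so j = k + 1
        have hj' : j = k + 1 := by omega
        subst hj'
        have hx : pvNext cs k = cs[k+1] := by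
          simp [pvNext, hj, List.getElem?_eq_getElem hj]
        rw [Bool.or_eq_true]; right; rw [hx]; exact h1
      · -- k = j + 1, so j = k - 1, k > 0
        have hkpos : 0 < k + 1 := by omega
        have hj' : j = k - 1 := by omega
        have hk0 : ¬ k = 0 := by omega
        subst hj'
        have hx : pvPrev cs k = cs[k-1] := by
          simp [pvPrev, hk0, List.getElem?_eq_getElem hj]
        rw [Bool.or_eq_true]; left; rw [hx]; exact h1
    · intro h
      rcases Bool.or_eq_true .. ▸ h with h | h
      · -- prev is anchor: k > 0 and cs[k-1] near
        have hkpos : ¬ k = 0 := by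
          intro h0; subst h0
          simp [pvPrev, pvNear, (by decide : PySem.Chars.isdigit ' ' = false)] at h
        have hj : k - 1 < cs.length := by omega
        refine ⟨(((k-1 : Nat) : Int), cs[k-1]), ?_, ?_, Or.inr (by omega)⟩
        · exact (PySem.List.mem_enumerate_iff cs 0 _).mpr ⟨k-1, hj, by simp⟩
        · simpa [pvPrev, hkpos, List.getElem?_eq_getElem hj] using h
      · -- next is anchor: k+1 < len and cs[k+1] near
        have hj : k + 1 < cs.length := by
          by_contra hge
          simp [pvNext, hge, pvNear, (by decide : PySem.Chars.isdigit ' ' = false)] at h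
        refine ⟨(((k+1 : Nat) : Int), cs[k+1]), ?_, ?_, Or.inl (by omega)⟩
        · exact (PySem.List.mem_enumerate_iff cs 0 _).mpr ⟨k+1, hj, by simp⟩
        · simpa [pvNext, hj, List.getElem?_eq_getElem hj] using h
  cases hb : (pvNear (pvPrev cs k) || pvNear (pvNext cs k)) <;>
    simp [PySem.Set.contains, hmem, hb]

-- the two loops produce the same character list
theorem pv_key (cs : List Char) :
    (PySem.List.pyRange 0 (cs.length : Int) 1).foldl (fun acc i =>
      if pvDC.contains (PySem.List.pyGetD cs i ' ') = true ∧ 1 < (cs.length : Int) then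
        if (0 < i ∧ (PySem.Chars.isdigit (PySem.List.pyGetD cs (i-1) ' ') = true ∨ PySem.List.pyGetD cs (i-1) ' ' = '.'))
            ∨ (1 < (cs.length : Int) ∧ i = 0 ∧ PySem.Chars.isdigit (PySem.List.pyGetD cs (i+1) ' ') = true) then
          acc ++ [pvDC.getD (PySem.List.pyGetD cs i ' ') (PySem.List.pyGetD cs i ' ')]
        else if i < (cs.length : Int) - 1 ∧ (PySem.Chars.isdigit (PySem.List.pyGetD cs (i+1) ' ') = true ∨ PySem.List.pyGetD cs (i+1) ' ' = '.') then
          acc ++ [pvDC.getD (PySem.List.pyGetD cs i ' ') (PySem.List.pyGetD cs i ' ')]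
        else acc ++ [PySem.List.pyGetD cs i ' ']
      else acc ++ [PySem.List.pyGetD cs i ' ']) []
    = (PySem.List.enumerate cs 0).map
        (fun p => if (pvDC.contains p.2 && PySem.Set.contains (pvHot cs) p.1) = true then pvDC.getD p.2 p.2 else p.2) := by
  have hbody : (fun (acc : List Char) (i : Int) =>
      if pvDC.contains (PySem.List.pyGetD cs i ' ') = true ∧ 1 < (cs.length : Int) then
        if (0 < i ∧ (PySem.Chars.isdigit (PySem.List.pyGetD cs (i-1) ' ') = true ∨ PySem.List.pyGetD cs (i-1) ' ' = '.'))
            ∨ (1 < (cs.length : Int) ∧ i = 0 ∧ PySem.Chars.isdigit (PySem.List.pyGetD cs (i+1) ' ') = true) then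
          acc ++ [pvDC.getD (PySem.List.pyGetD cs i ' ') (PySem.List.pyGetD cs i ' ')]
        else if i < (cs.length : Int) - 1 ∧ (PySem.Chars.isdigit (PySem.List.pyGetD cs (i+1) ' ') = true ∨ PySem.List.pyGetD cs (i+1) ' ' = '.') then
          acc ++ [pvDC.getD (PySem.List.pyGetD cs i ' ') (PySem.List.pyGetD cs i ' ')]
        else acc ++ [PySem.List.pyGetD cs i ' ']
      else acc ++ [PySem.List.pyGetD cs i ' '])
      = fun acc i => acc ++ [pvF cs i] := by
    funext acc i
    unfold pvF
    split_ifs <;> rfl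
  rw [hbody, PySem.List.foldl_append_singleton_eq_map, List.nil_append]
  apply List.ext_getElem
  · simp [PySem.List.length_pyRange_one, PySem.List.length_enumerate]
  · intro i h1 h2
    have hi : i < cs.length := by
      simpa [PySem.List.length_pyRange_one] using h1
    simp only [List.getElem_map, PySem.List.getElem_pyRange_one, zero_add,
      PySem.List.getElem_enumerate]
    rw [pvF_char cs i hi, pvHot_contains cs i hi, List.getD_eq_getElem _ _ hi]
    cases hc : pvDC.contains cs[i] <;>
      cases hn : (pvNear (pvPrev cs i) || pvNear (pvNext cs i)) <;> simp [hc, hn]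

-- ===== VERDICT (by name: the statement is the Claim_ definition above) =====
theorem CorrectDigits_spec : Claim_equal_CorrectDigits := by
  intro text _
  unfold Spec_CorrectDigits CorrectDigits CorrectDigits_alt
  exact congrArg String.ofList (pv_key text.toList)
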